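-- pv_equiv track=rewrite | github.com/christianbueno1/auth-onedrive | source_excel.py | make_unique_headers
-- ===== SOURCE A (Python) =====
-- def make_unique_headers(headers):
--     """
--     Make headers unique by appending a suffix to duplicate column names.
--     """
--     seen = {}
--     for i, header in enumerate(headers):
--         if header in seen:
--             seen[header] += 1
--             headers[i] = f"{header}_{seen[header]}"
--         else:
--             seen[header] = 0
--     return headers
-- ===== SOURCE B (Python) =====
-- def make_unique_headers(headers):
--     groups = {}
--     for i, h in enumerate(headers):
--         groups.setdefault(h, []).append(i)
--     for h, positions in groups.items():
--         for k, i in enumerate(positions):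
--             if k:
--                 headers[i] = f"{h}_{k}"
--     return headers
-- ===== Notes on version B (the rewrite author's own statement) =====
-- stated objective: alternative
-- what changed: B first groups the indices of each header value into a dict in one pass, then rewrites every later occurrence of each group with its 0-based rank as suffix, instead of A's single pass with a running seen-counter dict
import Mathlib
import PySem

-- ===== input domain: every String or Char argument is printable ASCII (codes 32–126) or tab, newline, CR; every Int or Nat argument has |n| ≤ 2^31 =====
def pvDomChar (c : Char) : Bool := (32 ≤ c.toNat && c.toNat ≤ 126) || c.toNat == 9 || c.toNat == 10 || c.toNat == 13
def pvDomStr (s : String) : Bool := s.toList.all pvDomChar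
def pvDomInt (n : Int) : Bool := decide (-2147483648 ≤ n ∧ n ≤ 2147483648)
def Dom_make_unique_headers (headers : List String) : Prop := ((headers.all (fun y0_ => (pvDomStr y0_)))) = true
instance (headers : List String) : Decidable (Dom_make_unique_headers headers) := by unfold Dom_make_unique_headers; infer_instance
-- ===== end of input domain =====

-- B groups the indices of each header value in one pass and then renames the later occurrences of
-- each group by their rank, instead of A's single pass with a running seen-counter dict; same
-- return value, and like A it mutates the list in place.

-- ===== PORT A =====
-- A's loop: for i, header in enumerate(headers), a dict 'seen', in-place write headers[i] = f"{header}_{seen[header]}".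
-- The foldl carries (seen, headers); the enumerate index is always ≥ 0, so .toNat is exact here.
def make_unique_headers (headers : List String) : List String :=
  ((PySem.List.enumerate headers).foldl
    (fun (st : PySem.Dict String Int × List String) p =>
      let seen := st.1
      let hs := st.2
      match seen.get? p.2 with
      | some c =>
          (seen.insert p.2 (c + 1), hs.set p.1.toNat (p.2 ++ "_" ++ PySem.Int.toStr (c + 1)))
      | none => (seen.insert p.2 0, hs))
    (PySem.Dict.empty, headers)).2

-- ===== PORT B =====
-- Source B: groups.setdefault(h, []).append(i) mutates the list stored under h, i.e. d[h] = d.get(h, []) + [i],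
-- which is exactly Dict.modify h [] (· ++ [i]); the stored indices come from enumerate, so ≥ 0 and .toNat is exact.
def make_unique_headers_alt (headers : List String) : List String :=
  let groups : PySem.Dict String (List Int) :=
    (PySem.List.enumerate headers).foldl
      (fun g p => g.modify p.2 [] (fun l => l ++ [p.1])) PySem.Dict.empty
  groups.items.foldl
    (fun hs vp =>
      (PySem.List.enumerate vp.2).foldl
        (fun a q =>
          if q.1 ≠ 0 then a.set q.2.toNat (vp.1 ++ "_" ++ PySem.Int.toStr q.1) else a)
        hs)
    headers

-- ===== PRECONDITION & SPEC =====
def Spec_make_unique_headers (headers : List String) (out : List String) : Prop := out = make_unique_headers_alt headers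
instance (headers : List String) (out : List String) : Decidable (Spec_make_unique_headers headers out) := by unfold Spec_make_unique_headers; infer_instance

-- ===== CLAIM (what is proved, stated in full; the proofs are below) =====
def Claim_equal_make_unique_headers : Prop := ∀ (headers : List String), Dom_make_unique_headers headers → Spec_make_unique_headers headers (make_unique_headers headers)

-- ===== LEMMAS AND PROOFS =====

-- the renaming rule both programs implement: a header equal to `h` whose prefix already
-- contains `k` copies of `h` becomes `h_k` (k ≥ 1), and stays `h` for k = 0
def altSuffix (pre : List String) (h : String) : String :=
  let k := List.count h pre
  if k = 0 then h else h ++ "_" ++ PySem.Int.toStr (k : Int)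

-- recursive characterisation shared by the two proofs: q is the already-processed prefix
def bmap (q l : List String) : List String :=
  match l with
  | [] => []
  | h :: t => altSuffix q h :: bmap (q ++ [h]) t

-- positions (0-based) at which `v` occurs in `l`
def posOf (l : List String) (v : String) : List Nat :=
  (List.range l.length).filter (fun j => l.getD j "" == v)

-- ---------- A-side ----------

lemma a_go (l q acc : List String) (seen : PySem.Dict String Int)
    (hlen : acc.length = q.length)
    (hinv : ∀ h, seen.get? h = if q.count h = 0 then none else some ((q.count h : Int) - 1)) :
    ((PySem.List.enumerate l (q.length : Int)).foldl
      (fun (st : PySem.Dict String Int × List String) p =>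
        let seen := st.1
        let hs := st.2
        match seen.get? p.2 with
        | some c =>
            (seen.insert p.2 (c + 1), hs.set p.1.toNat (p.2 ++ "_" ++ PySem.Int.toStr (c + 1)))
        | none => (seen.insert p.2 0, hs))
      (seen, acc ++ l)).2 = acc ++ bmap q l := by
  induction l generalizing q acc seen with
  | nil => simp [PySem.List.enumerate_nil, bmap]
  | cons h t ih =>
    rw [PySem.List.enumerate_cons, List.foldl_cons]
    have hget := hinv h
    by_cases hz : q.count h = 0
    · rw [if_pos hz] at hget
      simp only [hget]
      have hsuf : altSuffix q h = h := by simp [altSuffix, hz]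
      have hrw : acc ++ h :: t = (acc ++ [h]) ++ t := by simp
      rw [hrw]
      have := ih (q ++ [h]) (acc ++ [h]) (seen.insert h 0) (by simp [hlen])
        (by
          intro h'
          by_cases he : h' = h
          · subst he
            rw [PySem.Dict.get?_insert_self seen]
            simp [List.count_append, hz]
          · rw [PySem.Dict.get?_insert_of_ne seen _ he, hinv h']
            have : List.count h' (q ++ [h]) = List.count h' q := by
              simp [List.count_append,
                List.count_eq_zero_of_not_mem (by simp [he] : h' ∉ [h])]
            rw [this])
      simp only [List.length_append, List.length_cons, List.length_nil] at this ⊢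
      rw [show ((q.length : Int) + 1) = (((q.length + 1 : Nat)) : Int) by push_cast; ring]
      rw [this]
      simp [bmap, hsuf]
    · rw [if_neg hz] at hget
      simp only [hget]
      have htn : ((q.length : Int)).toNat = acc.length := by simp [hlen]
      have hset : (acc ++ h :: t).set ((q.length : Int)).toNat
          (h ++ "_" ++ PySem.Int.toStr ((q.count h : Int) - 1 + 1)) =
          (acc ++ [altSuffix q h]) ++ t := by
        rw [htn, List.set_append_right _ _ (le_refl _)]
        simp [altSuffix, hz]
      rw [hset]
      have := ih (q ++ [h]) (acc ++ [altSuffix q h])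
        (seen.insert h ((q.count h : Int) - 1 + 1)) (by simp [hlen])
        (by
          intro h'
          by_cases he : h' = h
          · subst he
            rw [PySem.Dict.get?_insert_self seen]
            have hc : List.count h' (q ++ [h']) = List.count h' q + 1 := by simp
            rw [hc, if_neg (by omega)]
            simp only [Option.some.injEq]
            push_cast
            ring
          · rw [PySem.Dict.get?_insert_of_ne seen _ he, hinv h']
            have : List.count h' (q ++ [h]) = List.count h' q := by
              simp [List.count_append,
                List.count_eq_zero_of_not_mem (by simp [he] : h' ∉ [h])]
            rw [this])
      simp only [List.length_append, List.length_cons, List.length_nil] at this ⊢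
      rw [show ((q.length : Int) + 1) = (((q.length + 1 : Nat)) : Int) by push_cast; ring]
      rw [this]
      simp [bmap]

-- bmap as a pointwise map over indices
lemma bmap_eq (l q : List String) :
    bmap q l = (List.range l.length).map
      (fun j => altSuffix (q ++ l.take j) (l.getD j "")) := by
  induction l generalizing q with
  | nil => simp [bmap]
  | cons h t ih =>
    rw [bmap, List.length_cons, List.range_succ_eq_map, List.map_cons, List.map_map]
    congr 1
    · simp [altSuffix]
    · rw [ih (q ++ [h])]
      apply List.map_congr_left
      intro j _
      simp [List.append_assoc]

-- ---------- B-side ----------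

lemma mem_posOf (l : List String) (v : String) (j : Nat) :
    j ∈ posOf l v ↔ j < l.length ∧ l.getD j "" = v := by
  simp [posOf, List.mem_filter, List.mem_range]

lemma posOf_append_singleton (l : List String) (x v : String) :
    posOf (l ++ [x]) v = posOf l v ++ if x = v then [l.length] else [] := by
  unfold posOf
  rw [List.length_append, List.length_cons, List.length_nil, List.range_succ, List.filter_append]
  congr 1
  · apply List.filter_congr
    intro j hj
    rw [List.mem_range] at hj
    rw [List.getD_append _ _ _ _ hj]
  · simp only [List.filter_cons, List.filter_nil]
    rw [show (l ++ [x]).getD l.length "" = x by simp]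
    split_ifs with h1 h2 h3 <;> simp_all

lemma length_posOf (l : List String) (v : String) :
    (posOf l v).length = l.count v := by
  induction l using List.reverseRecOn with
  | nil => simp [posOf]
  | append_singleton l x ih =>
    rw [posOf_append_singleton, List.length_append, ih, List.count_append]
    split_ifs with h <;> simp [h]

lemma index?_posOf (l : List String) (v : String) (j : Nat)
    (hj : j < l.length) (hv : l.getD j "" = v) :
    PySem.List.index? (posOf l v) j = some ((l.take j).count v) := by
  induction l using List.reverseRecOn with
  | nil => simp at hj
  | append_singleton l x ih =>
    rw [posOf_append_singleton]
    rcases lt_or_eq_of_le (Nat.lt_succ_iff.mp (by simpa using hj)) with hlt | heq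
    · have hv' : l.getD j "" = v := by
        rw [← hv, List.getD_append _ _ _ _ hlt]
      have hmem : j ∈ posOf l v := (mem_posOf l v j).mpr ⟨hlt, hv'⟩
      rw [PySem.List.index?_append_of_mem _ hmem, ih hlt hv',
        List.take_append_of_le_length (le_of_lt hlt)]
    · subst heq
      have hx : x = v := by
        rw [← hv]; simp
      rw [if_pos hx]
      have hnm : l.length ∉ posOf l v := by
        intro hm
        exact absurd ((mem_posOf l v _).mp hm).1 (lt_irrefl _)
      rw [PySem.List.index?_append_singleton_self _ _ hnm, length_posOf,
        List.take_append_of_le_length (le_refl _), List.take_length]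

lemma nodup_posOf (l : List String) (v : String) : (posOf l v).Nodup := by
  exact (List.nodup_range).filter _

def posOfInt (l : List String) (v : String) : List Int :=
  (posOf l v).map (Nat.cast : Nat → Int)

lemma posOf_eq_nil (l : List String) (x : String) (h : x ∉ l) : posOf l x = [] := by
  rw [List.eq_nil_iff_forall_not_mem]
  intro j hm
  obtain ⟨hlt, hget⟩ := (mem_posOf l x j).mp hm
  exact h (hget ▸ (List.getD_eq_getElem l "" hlt ▸ List.getElem_mem hlt))

lemma set_add_eq (s : List String) (x : String) :
    PySem.Set.add s x = if x ∈ s then s else s ++ [x] := by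
  simp [PySem.Set.add, PySem.Set.contains]

lemma modify_eq_insert (d : PySem.Dict String (List Int)) (k : String) (f : List Int → List Int) :
    d.modify k [] f = d.insert k (f (d.getD k [])) := by
  simp [PySem.Dict.modify, PySem.Dict.insert, PySem.Dict.getD]

lemma getD_eq_nil_of_get?_none (d : PySem.Dict String (List Int)) (k : String)
    (h : d.get? k = none) : d.getD k [] = [] := by
  simp [PySem.Dict.getD, h]

-- phase 1: the groups dict lists, per distinct header, the positions of that header
lemma groups_items (l : List String) :
    ((PySem.List.enumerate l).foldl
      (fun g p => g.modify p.2 [] (fun s => s ++ [p.1])) PySem.Dict.empty).items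
    = (PySem.Set.ofList l).map (fun v => (v, posOfInt l v)) := by
  induction l using List.reverseRecOn with
  | nil => rfl
  | append_singleton l x ih =>
    rw [PySem.List.enumerate_append, List.foldl_append, PySem.List.enumerate_cons,
      PySem.List.enumerate_nil, List.foldl_cons, List.foldl_nil]
    have hkeys : ((PySem.List.enumerate l).foldl
        (fun g p => g.modify p.2 [] (fun s => s ++ [p.1])) PySem.Dict.empty).keys
        = PySem.Set.ofList l := by
      simp only [PySem.Dict.keys, ih, List.map_map]
      exact List.map_id _
    set G := (PySem.List.enumerate l).foldl
        (fun g p => g.modify p.2 [] (fun s => s ++ [p.1])) PySem.Dict.empty with hG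
    rw [modify_eq_insert]
    by_cases hx : x ∈ l
    · have hxS : x ∈ PySem.Set.ofList l := (PySem.Set.mem_ofList l x).mpr hx
      have hgd : G.getD x [] = posOfInt l x := by
        apply PySem.Dict.getD_of_mem_items
        · rw [ih]
          exact List.mem_map_of_mem hxS
        · rw [hkeys]
          exact PySem.Set.nodup_ofList l
      have hcont : G.contains x = true := by
        rw [PySem.Dict.contains_eq_decide_mem_keys, hkeys]
        simpa using hxS
      rw [PySem.Dict.items_insert, if_pos hcont, ih, List.map_map,
        PySem.Set.ofList_append_singleton, set_add_eq,
        if_pos ((PySem.Set.mem_ofList l x).mpr hx)]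
      apply List.map_congr_left
      intro v hv
      by_cases hvx : v = x
      · subst hvx
        simp only [Function.comp_apply, beq_self_eq_true, if_pos]
        rw [hgd]
        unfold posOfInt
        rw [posOf_append_singleton, if_pos rfl]
        simp
      · simp only [Function.comp_apply]
        rw [if_neg (by simpa using hvx)]
        unfold posOfInt
        rw [posOf_append_singleton, if_neg (fun he => hvx he.symm)]
        simp
    · have hxS : x ∉ PySem.Set.ofList l := fun hm => hx ((PySem.Set.mem_ofList l x).mp hm)
      have hnone : G.get? x = none := by
        rw [PySem.Dict.get?_eq_none_iff_not_mem_keys, hkeys]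
        exact hxS
      have hcont : G.contains x = false := by
        rw [PySem.Dict.contains_eq_decide_mem_keys, hkeys]
        simpa using hxS
      rw [PySem.Dict.items_insert, hcont, if_neg (by simp), ih,
        getD_eq_nil_of_get?_none G x hnone,
        PySem.Set.ofList_append_singleton, set_add_eq,
        if_neg (fun hm => hx ((PySem.Set.mem_ofList l x).mp hm)), List.map_append]
      congr 1
      · apply List.map_congr_left
        intro v hv
        have hvl : v ∈ l := (PySem.Set.mem_ofList l v).mp hv
        have hvx : v ≠ x := fun he => hx (he ▸ hvl)
        unfold posOfInt
        rw [posOf_append_singleton, if_neg (fun he => hvx he.symm)]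
        simp
      · simp only [List.map_singleton, zero_add]
        unfold posOfInt
        rw [posOf_append_singleton, if_pos rfl, posOf_eq_nil l x hx]
        simp

-- length preservation of the write loops
lemma inner_length (L : List (Int × Int)) (v : String) (hs : List String) :
    (L.foldl (fun a q => if q.1 ≠ 0 then a.set q.2.toNat (v ++ "_" ++ PySem.Int.toStr q.1) else a)
      hs).length = hs.length := by
  induction L generalizing hs with
  | nil => rfl
  | cons q L ih =>
    rw [List.foldl_cons, ih]
    split_ifs <;> simp

lemma outer_length (items : List (String × List Int)) (hs : List String) :
    (items.foldl
      (fun hs vp =>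
        (PySem.List.enumerate vp.2).foldl
          (fun a q => if q.1 ≠ 0 then a.set q.2.toNat (vp.1 ++ "_" ++ PySem.Int.toStr q.1) else a)
          hs)
      hs).length = hs.length := by
  induction items generalizing hs with
  | nil => rfl
  | cons vp items ih =>
    rw [List.foldl_cons, ih, inner_length]

-- phase 2, one group: the loop writes `v_k` at the rank-k position of `v`, k ≥ 1
lemma inner_fold (v : String) (ps : List Nat) (s : Nat) (hs : List String) (j : Nat)
    (hnd : ps.Nodup) (hj : j < hs.length) :
    ((PySem.List.enumerate (ps.map (Nat.cast : Nat → Int)) (s : Int)).foldl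
      (fun a q => if q.1 ≠ 0 then a.set q.2.toNat (v ++ "_" ++ PySem.Int.toStr q.1) else a)
      hs)[j]?
    = match PySem.List.index? ps j with
      | some i => if s + i = 0 then hs[j]?
          else some (v ++ "_" ++ PySem.Int.toStr ((s : Int) + (i : Int)))
      | none => hs[j]? := by
  induction ps generalizing s hs with
  | nil =>
    rw [List.map_nil, PySem.List.enumerate_nil, List.foldl_nil]
    rw [show PySem.List.index? ([] : List Nat) j = none by
      simp [PySem.List.index?_eq_idxOf?]]
  | cons p rest ih =>
    obtain ⟨hpn, hnd'⟩ := List.nodup_cons.mp hnd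
    rw [List.map_cons, PySem.List.enumerate_cons, List.foldl_cons,
      show ((s : Int) + 1) = (((s + 1 : Nat)) : Int) by push_cast; ring]
    by_cases hjp : j = p
    · subst hjp
      have hrest : PySem.List.index? rest j = none :=
        (PySem.List.index?_eq_none_iff _ _).mpr hpn
      rw [PySem.List.index?_cons_self]
      by_cases hs0 : s = 0
      · subst hs0
        rw [if_neg (by simp)]
        rw [ih 1 hs hnd' hj, hrest]
        simp
      · rw [if_pos (by simpa using hs0)]
        rw [ih (s + 1) _ hnd' (by simpa using hj), hrest, Int.toNat_natCast,
          List.getElem?_set_self hj]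
        simp [hs0]
    · rw [PySem.List.index?_cons_of_ne rest (fun he => hjp he.symm)]
      by_cases hs0 : s = 0
      · subst hs0
        rw [if_neg (by simp)]
        rw [ih 1 hs hnd' hj]
        rcases hidx : PySem.List.index? rest j with _ | i
        · simp
        · simp only [Option.map_some]
          rw [if_neg (by omega), if_neg (by omega)]
          congr 2
          push_cast
          ring_nf
      · rw [if_pos (by simpa using hs0)]
        rw [ih (s + 1) _ hnd' (by simpa using hj), Int.toNat_natCast,
          List.getElem?_set_ne (fun he => hjp he.symm)]
        rcases hidx : PySem.List.index? rest j with _ | i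
        · simp
        · simp only [Option.map_some]
          rw [if_neg (by omega), if_neg (by omega)]
          congr 2
          push_cast
          ring_nf

-- phase 2, all groups
lemma outer_fold (headers : List String) (K : List String) (hs : List String)
    (hlen : hs.length = headers.length) (j : Nat) (hj : j < headers.length) :
    ((K.map (fun v => (v, posOfInt headers v))).foldl
      (fun hs vp =>
        (PySem.List.enumerate vp.2).foldl
          (fun a q => if q.1 ≠ 0 then a.set q.2.toNat (vp.1 ++ "_" ++ PySem.Int.toStr q.1) else a)
          hs)
      hs)[j]?
    = if headers.getD j "" ∈ K ∧ (headers.take j).count (headers.getD j "") ≠ 0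
      then some (headers.getD j "" ++ "_" ++
          PySem.Int.toStr (((headers.take j).count (headers.getD j "") : Nat) : Int))
      else hs[j]? := by
  induction K generalizing hs with
  | nil => simp
  | cons v K ih =>
    simp only [List.map_cons, List.foldl_cons]
    have hlen1 : ((PySem.List.enumerate (posOfInt headers v)).foldl
        (fun a q => if q.1 ≠ 0 then a.set q.2.toNat (v ++ "_" ++ PySem.Int.toStr q.1) else a)
        hs).length = headers.length := (inner_length _ v hs).trans hlen
    rw [ih _ hlen1]
    have hinner := inner_fold v (posOf headers v) 0 hs j (nodup_posOf headers v) (hlen ▸ hj)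
    simp only [Nat.cast_zero, zero_add] at hinner
    by_cases hK : headers.getD j "" ∈ K ∧ (headers.take j).count (headers.getD j "") ≠ 0
    · rw [if_pos hK, if_pos ⟨List.mem_cons_of_mem v hK.1, hK.2⟩]
    · rw [if_neg hK]
      rw [show (PySem.List.enumerate (posOfInt headers v)).foldl
          (fun a q => if q.1 ≠ 0 then a.set q.2.toNat (v ++ "_" ++ PySem.Int.toStr q.1) else a) hs
          = (PySem.List.enumerate ((posOf headers v).map (Nat.cast : Nat → Int))).foldl
          (fun a q => if q.1 ≠ 0 then a.set q.2.toNat (v ++ "_" ++ PySem.Int.toStr q.1) else a) hs from rfl,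
        hinner]
      by_cases hveq : headers.getD j "" = v
      · have hidx : PySem.List.index? (posOf headers v) j
            = some ((headers.take j).count v) := by
          rw [← hveq]
          exact index?_posOf headers _ j hj rfl
        rw [hidx]
        by_cases hcz : (headers.take j).count (headers.getD j "") = 0
        · rw [if_neg (fun hand => hand.2 hcz)]
          have hcz' : List.count v (List.take j headers) = 0 := by rw [← hveq]; exact hcz
          rw [hcz']
          rfl
        · rw [if_pos ⟨(by rw [hveq]; exact List.mem_cons_self), hcz⟩, hveq]
          have hcz' : ¬ List.count v (List.take j headers) = 0 := by rw [← hveq]; exact hcz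
          show (if List.count v (List.take j headers) = 0 then hs[j]?
            else some (v ++ "_" ++ PySem.Int.toStr ((List.count v (List.take j headers) : Nat) : Int))) = _
          rw [if_neg hcz']
      · have hidx : PySem.List.index? (posOf headers v) j = none := by
          refine (PySem.List.index?_eq_none_iff _ _).mpr (fun hm => hveq ?_)
          exact ((mem_posOf headers v j).mp hm).2
        rw [hidx,
          if_neg (fun hand => hK ⟨(List.mem_cons.mp hand.1).resolve_left hveq, hand.2⟩)]

-- ===== VERDICT (by name: the statement is the Claim_ definition above) =====
theorem make_unique_headers_spec : Claim_equal_make_unique_headers := by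
  intro headers _
  unfold Spec_make_unique_headers
  have hA : make_unique_headers headers = bmap [] headers := by
    unfold make_unique_headers
    have := a_go headers [] [] PySem.Dict.empty rfl
      (fun h => by simp [PySem.Dict.get?, PySem.Dict.empty])
    simpa using this
  have hB : make_unique_headers_alt headers = bmap [] headers := by
    show ((PySem.List.enumerate headers).foldl
        (fun g p => g.modify p.2 [] (fun l => l ++ [p.1])) PySem.Dict.empty).items.foldl
      (fun hs vp =>
        (PySem.List.enumerate vp.2).foldl
          (fun a q =>
            if q.1 ≠ 0 then a.set q.2.toNat (vp.1 ++ "_" ++ PySem.Int.toStr q.1) else a)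
          hs)
      headers = bmap [] headers
    rw [groups_items]
    apply List.ext_getElem?
    intro j
    by_cases hj : j < headers.length
    · rw [outer_fold headers (PySem.Set.ofList headers) headers rfl j hj]
      have hmem : headers.getD j "" ∈ PySem.Set.ofList headers := by
        rw [PySem.Set.mem_ofList, List.getD_eq_getElem headers "" hj]
        exact List.getElem_mem hj
      rw [bmap_eq, List.getElem?_map, List.getElem?_range hj, Option.map_some]
      simp only [List.nil_append, altSuffix]
      by_cases hcz : (headers.take j).count (headers.getD j "") = 0
      · rw [if_neg (fun hand => hand.2 hcz), if_pos hcz,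
          List.getElem?_eq_getElem hj, List.getD_eq_getElem headers "" hj]
      · rw [if_pos ⟨hmem, hcz⟩, if_neg hcz]
    · rw [Nat.not_lt] at hj
      rw [List.getElem?_eq_none (by rw [outer_length]; exact hj)]
      symm
      exact List.getElem?_eq_none (by rw [bmap_eq]; simpa using hj)
  rw [hB]
  exact hA
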